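-- pv_equiv track=rewrite | github.com/vaslabs-ltd/unrealfp | generate_docs_utils/Blueprint.py | skip_comments
-- ===== SOURCE A (Python) =====
-- def skip_comments(lines: list[str]) -> list[str]:
--     offset = 0
--     start_skipping = False
--     for i, line in enumerate(lines):
--         cleaned_line = line.strip()
--         if (not start_skipping and cleaned_line.startswith("/**")):
--             start_skipping = True
--             if (cleaned_line.endswith("*/")):
--                 offset = i + 1
--                 break
--         elif (start_skipping):
--             if (cleaned_line.endswith("*/")):
--                 offset = i + 1
--                 break
--     return lines[offset:]
-- ===== SOURCE B (Python) =====
-- def _find(lines, base, pred):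
--     """Index (offset by base) of the first line whose stripped text satisfies pred, else None."""
--     for i, line in enumerate(lines, base):
--         if pred(line.strip()):
--             return i
--     return None
--
--
-- def skip_comments(lines: list[str]) -> list[str]:
--     # Pass 1: first line opening a doc comment.
--     s = _find(lines, 0, lambda t: t.startswith("/**"))
--     if s is None:
--         return lines
--     # Pass 2: first terminator at or after the opener (a one-line comment terminates itself).
--     e = _find(lines[s:], s, lambda t: t.endswith("*/"))
--     # No terminator: the original keeps everything.
--     return lines if e is None else lines[e + 1:]
-- ===== Notes on version B (the rewrite author's own statement) =====
-- stated objective: simpler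
-- what changed: Replaces A's single boolean state machine (start_skipping flag plus offset) by two independent find passes: locate the first '/**' opener, then the first '*/' terminator from there, slicing after it.
import Mathlib
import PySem

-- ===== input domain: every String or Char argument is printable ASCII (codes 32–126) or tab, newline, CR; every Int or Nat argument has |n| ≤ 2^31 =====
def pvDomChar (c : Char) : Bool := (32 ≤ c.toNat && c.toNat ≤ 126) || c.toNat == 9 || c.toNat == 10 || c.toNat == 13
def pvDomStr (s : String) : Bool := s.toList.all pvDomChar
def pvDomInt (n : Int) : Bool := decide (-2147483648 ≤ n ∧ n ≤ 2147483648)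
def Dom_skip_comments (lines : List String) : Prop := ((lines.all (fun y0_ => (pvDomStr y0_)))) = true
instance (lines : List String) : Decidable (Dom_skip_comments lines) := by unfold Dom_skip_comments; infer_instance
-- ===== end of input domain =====

-- B replaces A's boolean state machine by two independent find passes (simpler decomposition; same O(n) cost).

-- ===== PORT A =====
-- the 'for i, line in enumerate(lines)' loop of A, carrying the index i and the start_skipping flag;
-- returns the final 'offset' (0 if the loop never breaks)
def pvA_loop : List String → Int → Bool → Int
  | [], _, _ => 0
  | line :: rest, i, start_skipping =>
    let cleaned_line := PySem.Str.strip line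
    if (!start_skipping) && PySem.Str.startswith cleaned_line "/**" then
      if PySem.Str.endswith cleaned_line "*/" then i + 1
      else pvA_loop rest (i + 1) true
    else if start_skipping then
      if PySem.Str.endswith cleaned_line "*/" then i + 1
      else pvA_loop rest (i + 1) start_skipping
    else pvA_loop rest (i + 1) start_skipping

def skip_comments (lines : List String) : List String :=
  PySem.List.slice lines (some (pvA_loop lines 0 false)) none

-- ===== PORT B =====
-- Source B's _find: index (offset by base) of the first line whose stripped text satisfies pred
def pvB_find (lines : List String) (base : Int) (pred : String → Bool) : Option Int :=
  match lines with
  | [] => none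
  | line :: rest =>
    if pred (PySem.Str.strip line) then some base else pvB_find rest (base + 1) pred

def skip_comments_alt (lines : List String) : List String :=
  match pvB_find lines 0 (fun t => PySem.Str.startswith t "/**") with
  | none => lines
  | some s =>
    match pvB_find (PySem.List.slice lines (some s) none) s
        (fun t => PySem.Str.endswith t "*/") with
    | none => lines
    | some e => PySem.List.slice lines (some (e + 1)) none

-- ===== PRECONDITION & SPEC =====
def Spec_skip_comments (lines : List String) (out : List String) : Prop := out = skip_comments_alt lines
instance (lines : List String) (out : List String) : Decidable (Spec_skip_comments lines out) := by unfold Spec_skip_comments; infer_instance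

-- ===== CLAIM (what is proved, stated in full; the proofs are below) =====
def Claim_equal_skip_comments : Prop := ∀ (lines : List String), Dom_skip_comments lines → Spec_skip_comments lines (skip_comments lines)

-- ===== LEMMAS AND PROOFS =====

-- proof-only views of B's two match expressions (so the nested matches have equation lemmas)
def pvBend (full : List String) (o : Option Int) : List String :=
  match o with
  | none => full
  | some e => PySem.List.slice full (some (e + 1)) none

def pvBstart (full : List String) (o : Option Int) : List String :=
  match o with
  | none => full
  | some s =>
    pvBend full (pvB_find (PySem.List.slice full (some s) none) s
      (fun t => PySem.Str.endswith t "*/"))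

theorem alt_eq_pvBstart (lines : List String) :
    skip_comments_alt lines =
      pvBstart lines (pvB_find lines 0 (fun t => PySem.Str.startswith t "/**")) := by
  unfold skip_comments_alt pvBstart pvBend
  cases pvB_find lines 0 (fun t => PySem.Str.startswith t "/**") with
  | none => rfl
  | some s =>
    cases pvB_find (PySem.List.slice lines (some s) none) s
        (fun t => PySem.Str.endswith t "*/") with
    | none => rfl
    | some e => rfl

-- once start_skipping is true, A's loop is exactly a find for a '*/' terminator
theorem pvA_loop_true (lines : List String) (i : Int) :
    pvA_loop lines i true =
      match pvB_find lines i (fun t => PySem.Str.endswith t "*/") with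
      | none => 0
      | some e => e + 1 := by
  induction lines generalizing i with
  | nil => rfl
  | cons l rest ih =>
    simp only [pvA_loop, pvB_find]
    rw [if_neg (by simp : ¬((!true && PySem.Str.startswith (PySem.Str.strip l) "/**") = true))]
    simp only [if_true]
    split_ifs with h
    · rfl
    · rw [ih]

theorem slice_from_zero {α : Type} (xs : List α) :
    PySem.List.slice xs (some (0 : Int)) none = xs := by
  simp [PySem.List.slice_from_natCast xs 0]

-- main invariant: for a suffix 'tail' of 'full' starting at index i, A's slice-by-loop-offset
-- equals B's two-pass result (with indices taken absolutely in 'full')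
theorem pvKey (tail : List String) (i : ℕ) (full : List String)
    (hdrop : full.drop i = tail) :
    PySem.List.slice full (some (pvA_loop tail (i : Int) false)) none =
      pvBstart full (pvB_find tail (i : Int) (fun t => PySem.Str.startswith t "/**")) := by
  induction tail generalizing i with
  | nil =>
    simp only [pvA_loop, pvB_find, pvBstart]
    exact slice_from_zero full
  | cons l rest ih =>
    have hdrop' : full.drop (i + 1) = rest := by
      have h1 : full.drop (i + 1) = (full.drop i).drop 1 := by
        rw [List.drop_drop]
      simp [h1, hdrop]
    have hsl : PySem.List.slice full (some ((i : Int))) none = l :: rest := by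
      rw [PySem.List.slice_from_natCast, hdrop]
    simp only [pvA_loop, pvB_find, Bool.not_false, Bool.true_and]
    by_cases hs : PySem.Str.startswith (PySem.Str.strip l) "/**" = true
    · rw [if_pos hs, if_pos hs]
      simp only [pvBstart, hsl, pvB_find]
      by_cases he : PySem.Str.endswith (PySem.Str.strip l) "*/" = true
      · rw [if_pos he, if_pos he]
        simp only [pvBend]
      · rw [if_neg he, if_neg he, pvA_loop_true]
        cases pvB_find rest ((i : Int) + 1) (fun t => PySem.Str.endswith t "*/") with
        | none => exact slice_from_zero full
        | some e => rfl
    · rw [if_neg hs, if_neg (by simp : ¬(false = true)), if_neg hs]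
      have hkey := ih (i + 1) hdrop'
      rw [show ((i : Int) + 1) = (((i + 1 : ℕ)) : Int) by push_cast; ring]
      exact hkey

-- ===== VERDICT (by name: the statement is the Claim_ definition above) =====
theorem skip_comments_spec : Claim_equal_skip_comments := by
  intro lines _
  show skip_comments lines = skip_comments_alt lines
  rw [alt_eq_pvBstart]
  have hkey := pvKey lines 0 lines (by simp)
  simpa using hkey
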